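-- pv_equiv track=rewrite | github.com/KeeeN/adventofcode | day11/main.py | pass_a_step
-- ===== SOURCE A (Python) =====
-- def neighbours(x: int, y: int) -> set[tuple[int, int]]:
--     result = {(x + i, y + j) for i in range(-1, 2) for j in range(-1, 2)}
--     result.remove((x, y))
--     return result
--
-- def pass_a_step(octopuses: dict) -> int:
--     def inc_1(pos: tuple[int, int], flashed: set, octopuses: dict) -> None:
--         if pos not in flashed and pos in octopuses.keys():
--             octopuses[pos] += 1
--             if octopuses[pos] > 9:
--                 flashed.add(pos)
--                 octopuses[pos] = 0
--                 for pos_ in neighbours(*pos):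
--                     inc_1(pos_, flashed, octopuses)
--         return flashed, octopuses
--
--     flashed = set()
--     for pos in octopuses.keys():
--         inc_1(pos, flashed, octopuses)
--     return len(flashed)
-- ===== SOURCE B (Python) =====
-- def pass_a_step(octopuses: dict) -> int:
--     # Explicit-worklist (stack) version of the flash cascade; mutates octopuses in place like the original.
--     flashed = set()
--     stack = []
--     for pos in octopuses:
--         stack.append(pos)
--         while stack:
--             p = stack.pop()
--             if p in flashed or p not in octopuses:
--                 continue
--             octopuses[p] += 1
--             if octopuses[p] > 9:
--                 flashed.add(p)
--                 octopuses[p] = 0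
--                 x, y = p
--                 nbrs = [(x + dx, y + dy) for dx in (-1, 0, 1) for dy in (-1, 0, 1)
--                         if (dx, dy) != (0, 0)]
--                 # reversed so the stack pops neighbours in their natural order
--                 stack.extend(reversed(nbrs))
--     return len(flashed)
-- ===== Notes on version B (the rewrite author's own statement) =====
-- stated objective: alternative
-- what changed: Replaces A's recursive inc_1 cascade with an explicit worklist: each key is pushed on a stack and the flash cascade is drained iteratively, pushing the 8 neighbours of every flashing cell instead of recursing into them.
import Mathlib
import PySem

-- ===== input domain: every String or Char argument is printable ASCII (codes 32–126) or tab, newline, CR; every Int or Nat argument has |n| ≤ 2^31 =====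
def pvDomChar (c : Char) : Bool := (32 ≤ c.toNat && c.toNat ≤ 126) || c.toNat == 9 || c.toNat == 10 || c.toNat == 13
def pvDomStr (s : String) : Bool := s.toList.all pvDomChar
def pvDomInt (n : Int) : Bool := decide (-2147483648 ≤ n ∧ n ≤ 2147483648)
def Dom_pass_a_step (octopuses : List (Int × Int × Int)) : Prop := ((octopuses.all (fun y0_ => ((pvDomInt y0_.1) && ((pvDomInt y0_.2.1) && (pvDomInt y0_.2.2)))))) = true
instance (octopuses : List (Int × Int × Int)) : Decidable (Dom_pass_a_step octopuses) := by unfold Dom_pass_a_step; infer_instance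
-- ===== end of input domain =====

-- B replaces A's recursive cascade with an explicit worklist (stack); same return value and
-- the same in-place mutation of the dict (equivalence proved for the return value).

-- ===== PORT A =====
-- Python's `neighbours` builds an 8-element set (the 9 offset tuples are pairwise distinct,
-- minus the centre) and A iterates it in unspecified hash order; the flash count does not
-- depend on that order, so the port iterates the set's elements in generation order.
def pvNbrsA (x y : Int) : List (Int × Int) :=
  ((PySem.List.pyRange (-1) 2 1).flatMap
    (fun i => (PySem.List.pyRange (-1) 2 1).map (fun j => (x + i, y + j)))).filter
    (fun p => p ≠ (x, y))

-- the shared mutable state of inc_1: (flashed, octopuses)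
abbrev pvSt := PySem.Set (Int × Int) × PySem.Dict (Int × Int) Int

-- inc_1: Python's recursion, with a fuel bound on recursion depth (a totality device only:
-- nesting only happens after a fresh key is flashed, so depth ≤ #keys + 1).
def pvInc1 : Nat → (Int × Int) → pvSt → pvSt
  | 0, _, st => st
  | f + 1, pos, (fl, d) =>
    if !fl.contains pos && d.contains pos then
      let v := d.getD pos 0 + 1          -- octopuses[pos] += 1  (key present: getD's default unused)
      if v > 9 then
        (pvNbrsA pos.1 pos.2).foldl (fun st q => pvInc1 f q st)
          (fl.add pos, (d.insert pos v).insert pos 0)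
      else (fl, d.insert pos v)
    else (fl, d)

def pass_a_step (octopuses : List (Int × Int × Int)) : Int :=
  let d0 : PySem.Dict (Int × Int) Int :=
    PySem.Dict.ofList (octopuses.map (fun t => ((t.1, t.2.1), t.2.2)))
  let res := d0.keys.foldl (fun st pos => pvInc1 (octopuses.length + 1) pos st)
    (PySem.Set.empty, d0)
  PySem.Set.len res.1

-- ===== PORT B =====
-- Source B's neighbour comprehension: offsets (-1,0,1) × (-1,0,1) without (0,0)
def pvNbrsB (x y : Int) : List (Int × Int) :=
  ([-1, 0, 1] : List Int).flatMap (fun dx =>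
    ([-1, 0, 1] : List Int).flatMap (fun dy =>
      if (dx, dy) ≠ ((0 : Int), (0 : Int)) then [(x + dx, y + dy)] else []))

-- the `while stack:` loop. Python keeps the stack's top at the END (append/pop); we keep the
-- top at the HEAD, so `stack.extend(reversed(nbrs))` becomes `nbrs ++ stack`. Fuel counts
-- flashes only (a totality device: flashes ≤ #keys).
def pvDrain : Nat → List (Int × Int) → pvSt → pvSt
  | _, [], st => st
  | f, p :: rest, (fl, d) =>
    if fl.contains p || !d.contains p then pvDrain f rest (fl, d)
    else
      let v := d.getD p 0 + 1            -- octopuses[p] += 1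
      if v > 9 then
        match f with
        | 0 => (fl, d)                    -- fuel exhausted: unreachable with the supplied fuel
        | f' + 1 =>
          pvDrain f' (pvNbrsB p.1 p.2 ++ rest) (fl.add p, (d.insert p v).insert p 0)
      else pvDrain f rest (fl, d.insert p v)
  termination_by f stack => (f, stack.length)

def pass_a_step_alt (octopuses : List (Int × Int × Int)) : Int :=
  let d0 : PySem.Dict (Int × Int) Int :=
    PySem.Dict.ofList (octopuses.map (fun t => ((t.1, t.2.1), t.2.2)))
  let res := d0.keys.foldl (fun st pos => pvDrain (octopuses.length + 1) [pos] st)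
    (PySem.Set.empty, d0)
  PySem.Set.len res.1

-- ===== PRECONDITION & SPEC =====
def Spec_pass_a_step (octopuses : List (Int × Int × Int)) (out : Int) : Prop := out = pass_a_step_alt octopuses
instance (octopuses : List (Int × Int × Int)) (out : Int) : Decidable (Spec_pass_a_step octopuses out) := by unfold Spec_pass_a_step; infer_instance

-- ===== CLAIM (what is proved, stated in full; the proofs are below) =====
def Claim_equal_pass_a_step : Prop := ∀ (octopuses : List (Int × Int × Int)), Dom_pass_a_step octopuses → Spec_pass_a_step octopuses (pass_a_step octopuses)

-- ===== LEMMAS AND PROOFS =====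

-- the two neighbour enumerations agree
theorem pvNbrs_eq (x y : Int) : pvNbrsA x y = pvNbrsB x y := by
  have hr : PySem.List.pyRange (-1) 2 1 = [-1, 0, 1] := by decide
  simp only [pvNbrsA, pvNbrsB, hr]
  simp [List.flatMap, Prod.ext_iff, List.filter]

-- measure: number of keys not yet flashed
def pvMu (st : pvSt) : Nat := (st.2.keys.filter (fun k => !st.1.contains k)).length

theorem mu_le_of (st st' : pvSt) (hk : st'.2.keys = st.2.keys)
    (hfl : ∀ x ∈ st.1, x ∈ st'.1) : pvMu st' ≤ pvMu st := by
  unfold pvMu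
  rw [hk]
  refine List.Sublist.length_le (List.monotone_filter_right _ ?_)
  intro a ha
  simp only [Bool.not_eq_true'] at *
  rcases h : PySem.Set.contains st.1 a with _ | _
  · rfl
  · have hmem := (PySem.Set.contains_iff st'.1 a).mpr (hfl a ((PySem.Set.contains_iff st.1 a).mp h))
    rw [ha] at hmem
    simp at hmem

theorem fold_inv (f : Nat)
    (h : ∀ p st, (pvInc1 f p st).2.keys = st.2.keys ∧ ∀ x ∈ st.1, x ∈ (pvInc1 f p st).1) :
    ∀ (ps : List (Int × Int)) (st : pvSt),
      ((ps.foldl (fun st q => pvInc1 f q st) st).2.keys = st.2.keys ∧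
        ∀ x ∈ st.1, x ∈ (ps.foldl (fun st q => pvInc1 f q st) st).1) := by
  intro ps
  induction ps with
  | nil => simp
  | cons q t iht =>
    intro st
    simp only [List.foldl_cons]
    refine ⟨?_, ?_⟩
    · rw [(iht (pvInc1 f q st)).1, (h q st).1]
    · intro x hx
      exact (iht (pvInc1 f q st)).2 x ((h q st).2 x hx)

theorem pvInc1_inv (f : Nat) : ∀ (p : Int × Int) (st : pvSt),
    (pvInc1 f p st).2.keys = st.2.keys ∧ ∀ x ∈ st.1, x ∈ (pvInc1 f p st).1 := by
  induction f with
  | zero => intro p st; simp [pvInc1]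
  | succ f ih =>
    intro p st
    obtain ⟨fl, d⟩ := st
    simp only [pvInc1]
    split
    · next hc =>
      have hd : d.contains p = true := by
        simp only [Bool.and_eq_true] at hc; exact hc.2
      split
      · next hv =>
        have := fold_inv f ih (pvNbrsA p.1 p.2) (fl.add p, (d.insert p (d.getD p 0 + 1)).insert p 0)
        refine ⟨?_, ?_⟩
        · rw [this.1]
          simp only [PySem.Dict.insert_insert_self]
          exact PySem.Dict.keys_insert_of_contains d 0 hd
        · intro x hx
          refine this.2 x ?_
          exact (PySem.Set.mem_add fl p x).mpr (Or.inl hx)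
      · exact ⟨PySem.Dict.keys_insert_of_contains d _ hd, fun x hx => hx⟩
    · exact ⟨rfl, fun x hx => hx⟩

theorem keys_pvInc1 (f : Nat) (p : Int × Int) (st : pvSt) :
    (pvInc1 f p st).2.keys = st.2.keys := (pvInc1_inv f p st).1

theorem fl_mono_pvInc1 (f : Nat) (p : Int × Int) (st : pvSt) (x : Int × Int)
    (hx : x ∈ st.1) : x ∈ (pvInc1 f p st).1 := (pvInc1_inv f p st).2 x hx

theorem mu_pvInc1_le (f : Nat) (p : Int × Int) (st : pvSt) :
    pvMu (pvInc1 f p st) ≤ pvMu st :=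
  mu_le_of st _ (keys_pvInc1 f p st) (fl_mono_pvInc1 f p st)

-- strict filter-length decrease
theorem length_filter_lt {α : Type} (p q : α → Bool) (hpq : ∀ a, q a = true → p a = true)
    (a : α) (hpa : p a = true) (hqa : q a = false) :
    ∀ (l : List α), a ∈ l → (l.filter q).length < (l.filter p).length := by
  intro l ha
  induction ha with
  | head t =>
    have hsub := List.Sublist.length_le (List.monotone_filter_right t hpq)
    simp [hpa, hqa]
    omega
  | tail b hmem ih =>
    rename_i t
    rcases hb : q b with _ | _
    · simp only [List.filter_cons, hb]
      rcases hb' : p b with _ | _ <;> simp <;> omega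
    · have hpb := hpq b hb
      simp only [List.filter_cons, hb, hpb]
      simpa using ih

theorem mu_flash_lt (fl : PySem.Set (Int × Int)) (d : PySem.Dict (Int × Int) Int)
    (pos : Int × Int) (hfl : fl.contains pos = false) (hd : d.contains pos = true) (v : Int) :
    pvMu (fl.add pos, (d.insert pos v).insert pos 0) < pvMu (fl, d) := by
  unfold pvMu
  simp only [PySem.Dict.insert_insert_self]
  rw [PySem.Dict.keys_insert_of_contains d 0 hd]
  have hnot : pos ∉ fl := fun hm => by
    rw [(PySem.Set.contains_iff fl pos).mpr hm] at hfl; cases hfl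
  refine length_filter_lt _ _ ?_ pos ?_ ?_ d.keys ?_
  · intro a ha
    simp only [Bool.not_eq_true'] at *
    rcases h : fl.contains a with _ | _
    · rfl
    · have hmem := (PySem.Set.contains_iff (fl.add pos) a).mpr ((PySem.Set.mem_add fl pos a).mpr
        (Or.inl ((PySem.Set.contains_iff fl a).mp h)))
      rw [ha] at hmem
      simp at hmem
  · simp only [hfl, Bool.not_false]
  · have hc : (fl.add pos).contains pos = true :=
      (PySem.Set.contains_iff _ _).mpr ((PySem.Set.mem_add fl pos pos).mpr (Or.inr rfl))
    simp only [hc, Bool.not_true]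
  · exact (PySem.Dict.contains_iff_mem_keys d pos).mp hd

theorem mu_pos (fl : PySem.Set (Int × Int)) (d : PySem.Dict (Int × Int) Int)
    (pos : Int × Int) (hfl : fl.contains pos = false) (hd : d.contains pos = true) :
    1 ≤ pvMu (fl, d) := by
  unfold pvMu
  have hnot : pos ∉ fl := fun hm => by
    rw [(PySem.Set.contains_iff fl pos).mpr hm] at hfl; cases hfl
  have : pos ∈ d.keys.filter (fun k => !fl.contains k) := by
    refine List.mem_filter.mpr ⟨(PySem.Dict.contains_iff_mem_keys d pos).mp hd, by simp [hnot]⟩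
  have h2 := List.length_pos_of_mem this
  show 1 ≤ (List.filter (fun k => !fl.contains k) d.keys).length
  omega

theorem mu_insert_eq (fl : PySem.Set (Int × Int)) (d : PySem.Dict (Int × Int) Int)
    (p : Int × Int) (hd : d.contains p = true) (v : Int) :
    pvMu (fl, d.insert p v) = pvMu (fl, d) := by
  unfold pvMu
  simp only
  rw [PySem.Dict.keys_insert_of_contains d v hd]

theorem mu_foldl_pvInc1_le (f : Nat) (ps : List (Int × Int)) : ∀ (σ : pvSt),
    pvMu (ps.foldl (fun st q => pvInc1 f q st) σ) ≤ pvMu σ := by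
  induction ps with
  | nil => intro σ; simp
  | cons q t iht =>
    intro σ
    simp only [List.foldl_cons]
    exact le_trans (iht _) (mu_pvInc1_le f q σ)

theorem pvDrain_fuel (n : Nat) : ∀ (ps : List (Int × Int)) (st : pvSt) (f g : Nat),
    pvMu st ≤ n → n + 1 ≤ f → n + 1 ≤ g → pvDrain f ps st = pvDrain g ps st := by
  induction n with
  | zero =>
    intro ps
    induction ps with
    | nil => intro st f g _ _ _; simp [pvDrain]
    | cons p t iht =>
      intro st f g hmu hf hg
      obtain ⟨fl, d⟩ := st
      cases f with
      | zero => omega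
      | succ f' =>
        cases g with
        | zero => omega
        | succ g' =>
          simp only [pvDrain]
          split
          · exact iht _ _ _ hmu hf hg
          · next hc =>
            have h1 : fl.contains p = false ∧ d.contains p = true := by
              rcases hcf : fl.contains p with _ | _ <;> rcases hck : d.contains p with _ | _ <;>
                simp [hcf, hck] at hc ⊢
              exact absurd ((PySem.Set.contains_iff fl p).mp hcf) hc
            split
            · exfalso
              have := mu_pos fl d p h1.1 h1.2
              omega
            · exact iht _ _ _ (by rw [mu_insert_eq fl d p h1.2]; exact hmu) hf hg
  | succ n ih =>
    intro ps
    induction ps with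
    | nil => intro st f g _ _ _; simp [pvDrain]
    | cons p t iht =>
      intro st f g hmu hf hg
      obtain ⟨fl, d⟩ := st
      cases f with
      | zero => omega
      | succ f' =>
        cases g with
        | zero => omega
        | succ g' =>
          simp only [pvDrain]
          split
          · exact iht _ _ _ hmu hf hg
          · next hc =>
            have h1 : fl.contains p = false ∧ d.contains p = true := by
              rcases hcf : fl.contains p with _ | _ <;> rcases hck : d.contains p with _ | _ <;>
                simp [hcf, hck] at hc ⊢
              exact absurd ((PySem.Set.contains_iff fl p).mp hcf) hc
            split
            · next hv =>
              have hlt := mu_flash_lt fl d p h1.1 h1.2 (d.getD p 0 + 1)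
              exact ih _ _ f' g' (by change pvMu (fl, d) ≤ n + 1 at hmu; omega)
                (by omega) (by omega)
            · exact iht _ _ _ (by rw [mu_insert_eq fl d p h1.2]; exact hmu) hf hg

theorem pvBridge (n : Nat) : ∀ (p : Int × Int) (rest : List (Int × Int)) (st : pvSt) (f g : Nat),
    pvMu st ≤ n → n + 1 ≤ f → n + 1 ≤ g →
    pvDrain g (p :: rest) st = pvDrain g rest (pvInc1 f p st) := by
  induction n with
  | zero =>
    intro p rest st f g hmu hf hg
    cases f with
    | zero => omega
    | succ f' =>
      cases g with
      | zero => omega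
      | succ g' =>
        obtain ⟨fl, d⟩ := st
        simp only [pvDrain, pvInc1]
        rcases hcf : fl.contains p with _ | _ <;> rcases hck : d.contains p with _ | _ <;>
          simp only [hcf, hck, Bool.not_false, Bool.not_true, Bool.false_or, Bool.true_or,
            Bool.or_false, Bool.or_true, Bool.true_and, Bool.false_and, Bool.and_false,
            Bool.and_true, Bool.and_self, Bool.or_self, Bool.false_eq_true, Bool.true_eq_false,
            ↓reduceIte] <;> try rfl
        -- unflashed key: increment; flashing impossible at μ = 0
        split
        · exfalso
          have := mu_pos fl d p hcf hck
          omega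
        · next hv => rfl
  | succ n ih =>
    intro p rest st f g hmu hf hg
    cases f with
    | zero => omega
    | succ f' =>
      cases g with
      | zero => omega
      | succ g' =>
        obtain ⟨fl, d⟩ := st
        simp only [pvDrain, pvInc1]
        rcases hcf : fl.contains p with _ | _ <;> rcases hck : d.contains p with _ | _ <;>
          simp only [hcf, hck, Bool.not_false, Bool.not_true, Bool.false_or, Bool.true_or,
            Bool.or_false, Bool.or_true, Bool.true_and, Bool.false_and, Bool.and_false,
            Bool.and_true, Bool.and_self, Bool.or_self, Bool.false_eq_true, Bool.true_eq_false,
            ↓reduceIte] <;> try rfl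
        split
        · next hv =>
            have hlt := mu_flash_lt fl d p hcf hck (d.getD p 0 + 1)
            have hmu' : pvMu (fl.add p, (d.insert p (d.getD p 0 + 1)).insert p 0) ≤ n := by
              change pvMu (fl, d) ≤ n + 1 at hmu
              omega
            rw [pvNbrs_eq]
            have aux : ∀ (qs : List (Int × Int)) (rest' : List (Int × Int)) (σ : pvSt),
                pvMu σ ≤ n →
                pvDrain g' (qs ++ rest') σ =
                pvDrain g' rest' (qs.foldl (fun st q => pvInc1 f' q st) σ) := by
              intro qs
              induction qs with
              | nil => intro rest' σ _; rfl
              | cons q t iht =>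
                intro rest' σ hσ
                rw [List.cons_append, ih q (t ++ rest') σ f' g' hσ (by omega) (by omega)]
                simp only [List.foldl_cons]
                exact iht rest' _ (le_trans (mu_pvInc1_le f' q σ) hσ)
            rw [aux _ rest _ hmu']
            exact pvDrain_fuel n rest _ g' (g' + 1)
              (le_trans (mu_foldl_pvInc1_le _ _ _) hmu') (by omega) (by omega)
        · rfl

-- the fold over the keys: per-key drain = per-key recursive inc_1
theorem fold_main (N : Nat) : ∀ (ks : List (Int × Int)) (st : pvSt), pvMu st ≤ N →
    ks.foldl (fun st p => pvDrain (N + 1) [p] st) st =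
    ks.foldl (fun st p => pvInc1 (N + 1) p st) st := by
  intro ks
  induction ks with
  | nil => intro st _; rfl
  | cons p t iht =>
    intro st hmu
    simp only [List.foldl_cons]
    have h1 : pvDrain (N + 1) [p] st = pvInc1 (N + 1) p st := by
      have h := pvBridge N p [] st (N + 1) (N + 1) hmu le_rfl le_rfl
      simpa [pvDrain] using h
    rw [h1]
    exact iht _ (le_trans (mu_pvInc1_le _ _ _) hmu)

theorem mu_init (d0 : PySem.Dict (Int × Int) Int) :
    pvMu (PySem.Set.empty, d0) = d0.keys.length := by
  unfold pvMu
  have h : ∀ k : Int × Int, (PySem.Set.empty : PySem.Set (Int × Int)).contains k = false :=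
    fun k => rfl
  simp [h]

theorem keys_ofList_len (ps : List ((Int × Int) × Int)) :
    (PySem.Dict.ofList ps).keys.length ≤ ps.length := by
  have h := PySem.Dict.keys_foldl_insert_key (κ := Int × Int) (ν := Int) ps Prod.fst
    (fun _ x => x.2) PySem.Dict.empty
  have h2 : (PySem.Dict.ofList ps).keys =
      PySem.Set.update (PySem.Dict.empty : PySem.Dict (Int × Int) Int).keys (ps.map Prod.fst) := h
  rw [h2]
  have h3 : PySem.Set.update (PySem.Dict.empty : PySem.Dict (Int × Int) Int).keys (ps.map Prod.fst) =
      PySem.Set.ofList (ps.map Prod.fst) := PySem.Set.update_nil_left _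
  rw [h3]
  exact le_trans (PySem.Set.length_ofList_le _) (by simp)

-- ===== VERDICT (by name: the statement is the Claim_ definition above) =====
theorem pass_a_step_spec : Claim_equal_pass_a_step := by
  unfold Claim_equal_pass_a_step Spec_pass_a_step
  intro oct _
  simp only [pass_a_step, pass_a_step_alt]
  rw [fold_main oct.length]
  rw [mu_init]
  exact le_trans (keys_ofList_len _) (by simp)
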